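-- pv_equiv track=rewrite | github.com/Kon0v3/Computer_SC | main.py | createGraph
-- ===== SOURCE A (Python) =====
-- from math import sqrt
--
-- def createGraph(N=32):  # step_2
--     squares = [i ** 2 for i in range(2, int(sqrt(2 * N - 1)) + 1)]  # 2*N-1 == k^2
--
--     graph = {i: [] for i in range(1, N + 1)}  # key:value -> list
--
--     for i in range(1, N + 1):
--         for j in range(i + 1, N + 1):
--             if (i + j) in squares:  # Is this a square number?
--                 graph[i].append(j)  # min + max = k^2: Undirected Graph
--                 graph[j].append(i)
--     return graph
-- ===== SOURCE B (Python) =====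
-- from math import isqrt
--
-- def createGraph(N=32):  # step_2
--     # For each node i, recover each neighbour directly as s - i for every candidate
--     # square s; the squares are ascending, so each adjacency list comes out sorted,
--     # which is exactly the order A's double loop produces.
--     squares = [k * k for k in range(2, isqrt(2 * N - 1) + 1)]
--     return {i: [s - i for s in squares if 1 <= s - i <= N and s - i != i]
--             for i in range(1, N + 1)}
-- ===== Notes on version B (the rewrite author's own statement) =====
-- stated objective: faster
-- what changed: Instead of scanning every pair (i,j) and testing i+j against the square list, B recovers each neighbour of i directly as s-i for every candidate square s, emitting each adjacency list already in the order A's double loop produces.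
-- outside the precondition, e.g. on createGraph(0): A raises ValueError, B raises ValueError
import Mathlib
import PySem

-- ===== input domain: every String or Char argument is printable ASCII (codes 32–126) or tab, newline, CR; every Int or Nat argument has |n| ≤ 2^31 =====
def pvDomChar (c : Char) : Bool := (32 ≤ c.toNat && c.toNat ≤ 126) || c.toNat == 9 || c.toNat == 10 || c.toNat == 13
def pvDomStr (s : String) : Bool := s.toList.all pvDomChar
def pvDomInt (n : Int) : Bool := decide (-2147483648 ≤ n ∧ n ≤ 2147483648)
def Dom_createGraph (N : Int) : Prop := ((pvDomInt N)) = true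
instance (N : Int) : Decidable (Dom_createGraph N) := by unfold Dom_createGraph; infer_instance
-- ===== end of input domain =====

-- B replaces A's all-pairs scan by recovering each neighbour of i directly as s - i
-- for every candidate square s (objective: faster).

-- ===== PORT A =====
-- int(sqrt(2*N-1)) is ported as Int.sqrt (2*N-1): exact on the admitted inputs
-- (1 ≤ N ≤ 2^31, where float sqrt followed by int() equals the integer square root).
def createGraph (N : Int) : List (Int × List Int) :=
  let squares : List Int :=
    (PySem.List.pyRange 2 (Int.sqrt (2*N-1) + 1) 1).map (fun i => i ^ 2)
  let graph0 : PySem.Dict Int (List Int) :=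
    (PySem.List.pyRange 1 (N+1) 1).foldl (fun d i => d.insert i []) PySem.Dict.empty
  let graph :=
    (PySem.List.pyRange 1 (N+1) 1).foldl (fun g i =>
      (PySem.List.pyRange (i+1) (N+1) 1).foldl (fun g j =>
        if (i + j) ∈ squares then
          (g.modify i [] (fun l => l ++ [j])).modify j [] (fun l => l ++ [i])
        else g) g) graph0
  graph.items

-- ===== PORT B =====
-- math.isqrt is Int.sqrt exactly.
def createGraph_alt (N : Int) : List (Int × List Int) :=
  let squares : List Int :=
    (PySem.List.pyRange 2 (Int.sqrt (2*N-1) + 1) 1).map (fun k => k * k)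
  (PySem.List.pyRange 1 (N+1) 1).map (fun i =>
    (i, (squares.filter (fun s => decide (1 ≤ s - i ∧ s - i ≤ N ∧ s - i ≠ i))).map
          (fun s => s - i)))

-- ===== PRECONDITION & SPEC =====
-- For N ≤ 0 both A (math.sqrt of a negative) and B (math.isqrt of a negative)
-- raise ValueError; Pre_ excludes exactly those inputs.
def Pre_createGraph (N : Int) : Prop := 1 ≤ N
instance (N : Int) : Decidable (Pre_createGraph N) := by unfold Pre_createGraph; infer_instance
def pvWitness_createGraph : Int := (8)

def Spec_createGraph (N : Int) (out : List (Int × List Int)) : Prop := out = createGraph_alt N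
instance (N : Int) (out : List (Int × List Int)) : Decidable (Spec_createGraph N out) := by unfold Spec_createGraph; infer_instance

-- ===== CLAIM (what is proved, stated in full; the proofs are below) =====
def Claim_equal_createGraph : Prop := ∀ (N : Int), Dom_createGraph N → Pre_createGraph N → Spec_createGraph N (createGraph N)

-- ===== LEMMAS AND PROOFS =====

-- The (key, appended-value) pairs processed by A's double loop, in processing order.
def pvEvents (N : Int) (squares : List Int) : List (Int × Int) :=
  (PySem.List.pyRange 1 (N+1) 1).flatMap (fun i =>
    (PySem.List.pyRange (i+1) (N+1) 1).flatMap (fun j =>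
      if (i + j) ∈ squares then [(i, j), (j, i)] else []))

-- A's double loop is the fold of modify/append over pvEvents.
theorem pv_fold_eq (N : Int) (squares : List Int) (g : PySem.Dict Int (List Int)) :
    (pvEvents N squares).foldl (fun d p => d.modify p.1 [] (fun l => l ++ [p.2])) g
    = (PySem.List.pyRange 1 (N+1) 1).foldl (fun g i =>
        (PySem.List.pyRange (i+1) (N+1) 1).foldl (fun g j =>
          if (i + j) ∈ squares then
            (g.modify i [] (fun l => l ++ [j])).modify j [] (fun l => l ++ [i])
          else g) g) g := by
  unfold pvEvents
  rw [List.foldl_flatMap]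
  apply PySem.List.foldl_congr_mem
  intro acc i _
  rw [List.foldl_flatMap]
  apply PySem.List.foldl_congr_mem
  intro acc2 j _
  by_cases h : (i + j) ∈ squares <;> simp [h]

theorem pv_update_eq_self {s xs : List Int} (h : ∀ x ∈ xs, x ∈ s) :
    PySem.Set.update s xs = s := by
  induction xs generalizing s with
  | nil => rfl
  | cons a t ih =>
    have ha : PySem.Set.add s a = s := by
      simp [PySem.Set.add, PySem.Set.contains, h a (by simp)]
    simp only [PySem.Set.update, List.foldl_cons] at *
    rw [ha]; exact ih (fun x hx => h x (by simp [hx]))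

theorem pv_events_fst (N : Int) (squares : List Int) (p : Int × Int)
    (hp : p ∈ pvEvents N squares) : p.1 ∈ PySem.List.pyRange 1 (N+1) 1 := by
  unfold pvEvents at hp
  simp only [List.mem_flatMap] at hp
  obtain ⟨i, hi, j, hj, hin⟩ := hp
  rw [PySem.List.mem_pyRange_one] at hi hj ⊢
  split at hin <;> simp at hin
  · rcases hin with h | h <;> (subst h; simp; omega)

-- a flatMap over a range whose function is supported at a single point
theorem pv_flatMap_single {α : Type} (a b v : Int) (f : Int → List α)
    (h1 : a ≤ v) (h2 : v < b) (hf : ∀ j, j ≠ v → f j = []) :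
    (PySem.List.pyRange a b 1).flatMap f = f v := by
  rw [PySem.List.pyRange_one_append a v b h1 (by omega),
      PySem.List.pyRange_one_cons (by omega : v < b)]
  have hl : (PySem.List.pyRange a v 1).flatMap f = [] :=
    List.flatMap_eq_nil_iff.mpr fun x hx =>
      hf x (by rw [PySem.List.mem_pyRange_one] at hx; omega)
  have hr : (PySem.List.pyRange (v+1) b 1).flatMap f = [] :=
    List.flatMap_eq_nil_iff.mpr fun x hx =>
      hf x (by rw [PySem.List.mem_pyRange_one] at hx; omega)
  simp [hl, hr]

theorem pv_flatMap_if_singleton (l : List Int) (p : Int → Bool) :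
    (l.flatMap (fun x => if p x then [x] else [])) = l.filter p := by
  induction l with
  | nil => rfl
  | cons a t ih => by_cases h : p a <;> simp [h, ih]

-- the events keyed by v, in processing order, are exactly B's neighbour list of v
theorem pv_core (squares : List Int) (hsq : squares.Pairwise (· < ·)) (N v : Int)
    (hv1 : 1 ≤ v) (hvN : v ≤ N) :
    ((pvEvents N squares).filter (fun p => p.1 == v)).map (fun p => p.2)
    = (squares.filter (fun s => decide (1 ≤ s - v ∧ s - v ≤ N ∧ s - v ≠ v))).map
        (fun s => s - v) := by
  have low_def : ∀ i : Int, i < v →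
      ((PySem.List.pyRange (i+1) (N+1) 1).flatMap (fun j =>
        ((if (i + j) ∈ squares then [(i, j), (j, i)] else []).filter
          (fun p => p.1 == v)).map (fun p => p.2)))
      = (if decide ((i + v) ∈ squares) then [i] else []) := by
    intro i hiv
    have h1 : (i == v) = false := by simp; omega
    rw [pv_flatMap_single (i+1) (N+1) v _ (by omega) (by omega)]
    · by_cases h : (i + v) ∈ squares <;> simp [h, h1]
    · intro j hj
      have h2 : (j == v) = false := by simp [hj]
      by_cases h : (i + j) ∈ squares <;> simp [h, h1, h2]
  have mid_def :
      ((PySem.List.pyRange (v+1) (N+1) 1).flatMap (fun j =>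
        ((if (v + j) ∈ squares then [(v, j), (j, v)] else []).filter
          (fun p => p.1 == v)).map (fun p => p.2)))
      = (PySem.List.pyRange (v+1) (N+1) 1).filter (fun j => decide ((v + j) ∈ squares)) := by
    rw [← pv_flatMap_if_singleton (PySem.List.pyRange (v+1) (N+1) 1)
          (fun j => decide ((v + j) ∈ squares))]
    apply List.flatMap_congr
    intro j hj
    rw [PySem.List.mem_pyRange_one] at hj
    have h2 : (j == v) = false := by simp; omega
    by_cases h : (v + j) ∈ squares <;> simp [h, h2]
  have high_def : ∀ i : Int, v < i →
      ((PySem.List.pyRange (i+1) (N+1) 1).flatMap (fun j =>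
        ((if (i + j) ∈ squares then [(i, j), (j, i)] else []).filter
          (fun p => p.1 == v)).map (fun p => p.2))) = [] := by
    intro i hiv
    refine List.flatMap_eq_nil_iff.mpr fun j hj => ?_
    rw [PySem.List.mem_pyRange_one] at hj
    have h1 : (i == v) = false := by simp; omega
    have h2 : (j == v) = false := by simp; omega
    by_cases h : (i + j) ∈ squares <;> simp [h, h1, h2]
  have hLHS :
      ((pvEvents N squares).filter (fun p => p.1 == v)).map (fun p => p.2)
      = (PySem.List.pyRange 1 v 1).filter (fun i => decide ((i + v) ∈ squares))
        ++ (PySem.List.pyRange (v+1) (N+1) 1).filter (fun j => decide ((v + j) ∈ squares)) := by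
    unfold pvEvents
    rw [List.filter_flatMap, List.map_flatMap]
    rw [PySem.List.pyRange_one_append 1 v (N+1) (by omega) (by omega),
        PySem.List.pyRange_one_cons (by omega : v < N+1)]
    simp only [List.flatMap_append, List.flatMap_cons, List.filter_flatMap,
      List.map_flatMap]
    rw [mid_def]
    have hlow : (PySem.List.pyRange 1 v 1).flatMap (fun i =>
        (PySem.List.pyRange (i+1) (N+1) 1).flatMap (fun j =>
          ((if (i + j) ∈ squares then [(i, j), (j, i)] else []).filter
            (fun p => p.1 == v)).map (fun p => p.2)))
        = (PySem.List.pyRange 1 v 1).filter (fun i => decide ((i + v) ∈ squares)) := by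
      rw [← pv_flatMap_if_singleton (PySem.List.pyRange 1 v 1)
            (fun i => decide ((i + v) ∈ squares))]
      apply List.flatMap_congr
      intro i hi
      rw [PySem.List.mem_pyRange_one] at hi
      exact low_def i (by omega)
    have hhigh : (PySem.List.pyRange (v+1) (N+1) 1).flatMap (fun i =>
        (PySem.List.pyRange (i+1) (N+1) 1).flatMap (fun j =>
          ((if (i + j) ∈ squares then [(i, j), (j, i)] else []).filter
            (fun p => p.1 == v)).map (fun p => p.2)))
        = [] := by
      refine List.flatMap_eq_nil_iff.mpr fun i hi => ?_
      rw [PySem.List.mem_pyRange_one] at hi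
      exact high_def i (by omega)
    rw [hlow, hhigh, List.append_nil]
  rw [hLHS]
  -- both sides are strictly increasing lists with the same members
  have hlow_pw := List.Pairwise.filter (fun i => decide ((i + v) ∈ squares))
      (PySem.List.pairwise_lt_pyRange_one 1 v)
  have hup_pw := List.Pairwise.filter (fun j => decide ((v + j) ∈ squares))
      (PySem.List.pairwise_lt_pyRange_one (v+1) (N+1))
  have hcat_pw : ((PySem.List.pyRange 1 v 1).filter (fun i => decide ((i + v) ∈ squares))
        ++ (PySem.List.pyRange (v+1) (N+1) 1).filter
            (fun j => decide ((v + j) ∈ squares))).Pairwise (· < ·) := by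
    rw [List.pairwise_append]
    refine ⟨hlow_pw, hup_pw, ?_⟩
    intro x hx y hy
    have hx' := (List.mem_filter.mp hx).1
    have hy' := (List.mem_filter.mp hy).1
    rw [PySem.List.mem_pyRange_one] at hx' hy'
    omega
  have hrhs_pw : ((squares.filter
        (fun s => decide (1 ≤ s - v ∧ s - v ≤ N ∧ s - v ≠ v))).map
          (fun s => s - v)).Pairwise (· < ·) := by
    rw [List.pairwise_map]
    exact (List.Pairwise.filter _ hsq).imp (fun h => by omega)
  have hmem : ∀ x, x ∈ (PySem.List.pyRange 1 v 1).filter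
        (fun i => decide ((i + v) ∈ squares))
        ++ (PySem.List.pyRange (v+1) (N+1) 1).filter
            (fun j => decide ((v + j) ∈ squares))
      ↔ x ∈ (squares.filter
        (fun s => decide (1 ≤ s - v ∧ s - v ≤ N ∧ s - v ≠ v))).map (fun s => s - v) := by
    intro x
    simp only [List.mem_append, List.mem_filter, List.mem_map,
      PySem.List.mem_pyRange_one, decide_eq_true_eq]
    constructor
    · rintro (⟨⟨hx1, hx2⟩, hs⟩ | ⟨⟨hx1, hx2⟩, hs⟩)
      · exact ⟨x + v, ⟨hs, by omega⟩, by omega⟩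
      · exact ⟨v + x, ⟨hs, by omega⟩, by omega⟩
    · rintro ⟨s, ⟨hs, h1, h2, h3⟩, rfl⟩
      by_cases hlt : s - v < v
      · exact Or.inl ⟨⟨by omega, by omega⟩, by rwa [show s - v + v = s by ring]⟩
      · exact Or.inr ⟨⟨by omega, by omega⟩, by rwa [show v + (s - v) = s by ring]⟩
  exact ((List.perm_ext_iff_of_nodup
      (hcat_pw.imp (fun h => ne_of_lt h)) (hrhs_pw.imp (fun h => ne_of_lt h))).mpr hmem).eq_of_pairwise
    (fun a b _ _ h1 h2 => absurd h2 (not_lt.mpr h1.le)) hcat_pw hrhs_pw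

-- ===== VERDICT =====
theorem createGraph_spec : Claim_equal_createGraph := by
  intro N _ hPre
  unfold Pre_createGraph at hPre
  unfold Spec_createGraph createGraph createGraph_alt
  dsimp only
  set r : Int := Int.sqrt (2*N-1) with hr
  -- the two ports build the same square list
  have hsqeq : (PySem.List.pyRange 2 (r+1) 1).map (fun i => i ^ 2)
      = (PySem.List.pyRange 2 (r+1) 1).map (fun k => k * k) :=
    List.map_congr_left fun i _ => pow_two i
  rw [hsqeq]
  set squares : List Int := (PySem.List.pyRange 2 (r+1) 1).map (fun k => k * k) with hsq
  have hsq_pw : squares.Pairwise (· < ·) := by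
    rw [hsq, List.pairwise_map]
    refine List.Pairwise.imp_of_mem ?_ (PySem.List.pairwise_lt_pyRange_one 2 (r+1))
    intro a b ha hb h
    rw [PySem.List.mem_pyRange_one] at ha
    nlinarith [ha.1]
  set graph0 : PySem.Dict Int (List Int) :=
    (PySem.List.pyRange 1 (N+1) 1).foldl (fun d i => d.insert i []) PySem.Dict.empty
    with hg0
  have h0 : graph0.items = (PySem.List.pyRange 1 (N+1) 1).map (fun i => (i, ([] : List Int))) := by
    rw [hg0, PySem.Dict.items_foldl_insert_fresh (k := fun a => a) (v := fun _ => ([] : List Int))]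
    · simp [PySem.Dict.empty]
    · intro a _; exact PySem.Dict.contains_empty a
    · simpa using PySem.List.nodup_pyRange_one 1 (N+1)
  have hkeys0 : graph0.keys = PySem.List.pyRange 1 (N+1) 1 := by
    simp only [PySem.Dict.keys, h0, List.map_map]
    exact List.map_id _
  have hnodup0 : graph0.keys.Nodup := by
    rw [hkeys0]; exact PySem.List.nodup_pyRange_one 1 (N+1)
  rw [← pv_fold_eq N squares graph0]
  set final : PySem.Dict Int (List Int) :=
    (pvEvents N squares).foldl (fun d p => d.modify p.1 [] (fun l => l ++ [p.2])) graph0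
    with hfinal
  have hkeysF : final.keys = PySem.List.pyRange 1 (N+1) 1 := by
    rw [hfinal, PySem.Dict.keys_foldl_modify_key (key := Prod.fst), hkeys0]
    exact pv_update_eq_self (by
      intro x hx
      simp only [List.mem_map] at hx
      obtain ⟨p, hp, rfl⟩ := hx
      exact pv_events_fst N squares p hp)
  have hnodupF : final.keys.Nodup := by
    rw [hkeysF]; exact PySem.List.nodup_pyRange_one 1 (N+1)
  rw [PySem.Dict.items_eq_map_keys final hnodupF [], hkeysF]
  apply List.map_congr_left
  intro v hv
  rw [PySem.List.mem_pyRange_one] at hv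
  have hgetD : final.getD v [] = (squares.filter
      (fun s => decide (1 ≤ s - v ∧ s - v ≤ N ∧ s - v ≠ v))).map (fun s => s - v) := by
    rw [hfinal, PySem.Dict.getD_foldl_modify_append]
    have hmem0 : (v, ([] : List Int)) ∈ graph0.items := by
      rw [h0]
      exact List.mem_map.mpr ⟨v, by rw [PySem.List.mem_pyRange_one]; omega, rfl⟩
    rw [PySem.Dict.getD_of_mem_items graph0 hmem0 hnodup0 [], List.nil_append]
    exact pv_core squares hsq_pw N v (by omega) (by omega)
  rw [hgetD]
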